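-- pv_equiv track=rewrite | github.com/morgoth1145/advent-of-code | 2016/07/solution.py | split_ip
-- ===== SOURCE A (Python) =====
-- def split_ip(ip):
--     supernets = []
--     hypernets = []
--
--     while True:
--         idx = ip.find('[')
--         if idx == -1:
--             assert(-1 == ip.find(']'))
--             supernets.append(ip)
--             break
--
--         end_idx = ip.find(']')
--         assert(end_idx > idx)
--
--         supernets.append(ip[:idx])
--         hyper = ip[idx+1:end_idx]
--         ip = ip[end_idx+1:]
--         assert(hyper.find('[') == -1)
--         hypernets.append(hyper)
--
--     return supernets, hypernets
-- ===== SOURCE B (Python) =====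
-- def split_ip(ip):
--     supernets = []
--     hypernets = []
--     current = ''
--     in_bracket = False
--     for c in ip:
--         if c == '[':
--             assert not in_bracket
--             supernets.append(current)
--             current = ''
--             in_bracket = True
--         elif c == ']':
--             assert in_bracket
--             hypernets.append(current)
--             current = ''
--             in_bracket = False
--         else:
--             current += c
--     assert not in_bracket
--     supernets.append(current)
--     return supernets, hypernets
-- ===== Notes on version B (the rewrite author's own statement) =====
-- stated objective: idiomatic
-- what changed: Replaced the repeated find-and-slice while-loop with a single character-by-character scan keeping a current buffer and an in_bracket flag.
import Mathlib
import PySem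

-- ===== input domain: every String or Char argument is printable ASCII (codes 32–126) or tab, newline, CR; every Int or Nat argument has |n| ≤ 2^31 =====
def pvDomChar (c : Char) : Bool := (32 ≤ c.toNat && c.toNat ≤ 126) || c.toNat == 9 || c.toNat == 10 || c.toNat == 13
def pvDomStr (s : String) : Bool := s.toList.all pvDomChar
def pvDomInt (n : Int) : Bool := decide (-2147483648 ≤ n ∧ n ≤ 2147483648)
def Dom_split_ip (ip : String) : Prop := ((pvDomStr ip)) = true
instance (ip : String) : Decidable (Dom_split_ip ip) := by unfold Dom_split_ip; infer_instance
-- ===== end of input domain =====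

-- B replaces A's repeated find-and-slice while-loop by one character-by-character scan
-- with a current buffer and an in_bracket flag (idiomatic single pass).
-- Pre_ excludes exactly the malformed inputs (non-alternating brackets) on which both
-- Pythons raise AssertionError.


-- ===== PORT A =====
-- ip.find('[') with a nonnegative result is List.findIdx? over the chars: some i = index
-- of the first occurrence, none = Python's -1 (exact on these chars); nonnegative slices
-- ip[:idx], ip[idx+1:end_idx], ip[end_idx+1:] are take/drop (exact for 0 ≤ bounds ≤ len).
-- Branches where a Python assert fails (and A raises) are outside Pre_; the port just
-- stops with the state built so far there.
def split_ip_go (cs : List Char) (supernets hypernets : List String) :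
    List String × List String :=
  match h1 : cs.findIdx? (· = '[') with
  | none =>
      -- assert(-1 == ip.find(']')) : raises outside Pre_
      (supernets ++ [String.ofList cs], hypernets)
  | some idx =>
      match h2 : cs.findIdx? (· = ']') with
      | none =>
          -- assert(end_idx > idx) fails (end_idx = -1) : A raises, outside Pre_
          (supernets, hypernets)
      | some end_idx =>
          if end_idx > idx then
            -- assert(hyper.find('[') == -1) : raises outside Pre_
            split_ip_go (cs.drop (end_idx + 1))
              (supernets ++ [String.ofList (cs.take idx)])
              (hypernets ++ [String.ofList ((cs.drop (idx + 1)).take (end_idx - idx - 1))])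
          else
            -- assert(end_idx > idx) fails : A raises, outside Pre_
            (supernets, hypernets)
  termination_by cs.length
  decreasing_by
    have hne : cs ≠ [] := by
      intro h; subst h; simp at h2
    have : 0 < cs.length := List.length_pos_iff.mpr hne
    simp [List.length_drop]; omega

def split_ip (ip : String) : List String × List String :=
  split_ip_go ip.toList [] []

-- ===== PORT B =====
-- One fold over the characters; state = (supernets, hypernets, current, in_bracket).
-- On the branches where Source B's asserts fail (and it raises) the port leaves the state
-- unchanged / appends regardless — those inputs are outside Pre_.
def stepB (st : List String × List String × List Char × Bool) (c : Char) :
    List String × List String × List Char × Bool :=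
  let (sup, hyp, cur, inb) := st
  if c = '[' then
    if inb then st                                    -- assert not in_bracket : raises, outside Pre_
    else (sup ++ [String.ofList cur], hyp, [], true)
  else if c = ']' then
    if inb then (sup, hyp ++ [String.ofList cur], [], false)
    else st                                           -- assert in_bracket : raises, outside Pre_
  else (sup, hyp, cur ++ [c], inb)

def split_ip_alt (ip : String) : List String × List String :=
  let st := ip.toList.foldl stepB ([], [], [], false)
  -- final: assert not in_bracket (raises outside Pre_); supernets.append(current)
  (st.1 ++ [String.ofList st.2.2.1], st.2.1)

-- ===== PRECONDITION & SPEC =====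
def isBr (c : Char) : Bool := c = '[' || c = ']'

-- the bracket subsequence must read '[' ']' '[' ']' … and be balanced
def altBr : List Char → Bool
  | [] => true
  | [_] => false
  | a :: b :: r => (a = '[' && b = ']') && altBr r

-- Pre_ excludes exactly the malformed bracket patterns (unclosed '[', stray or leading ']',
-- nested '[') on which Python A raises AssertionError (and B does too).
def Pre_split_ip (ip : String) : Prop := altBr (ip.toList.filter isBr) = true

instance (ip : String) : Decidable (Pre_split_ip ip) := by unfold Pre_split_ip; infer_instance

def pvWitness_split_ip : String := "abc[def]ghi[jk]z"

def Spec_split_ip (ip : String) (out : List String × List String) : Prop := out = split_ip_alt ip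
instance (ip : String) (out : List String × List String) : Decidable (Spec_split_ip ip out) := by unfold Spec_split_ip; infer_instance

-- ===== CLAIM (what is proved, stated in full; the proofs are below) =====
def Claim_equal_split_ip : Prop := ∀ (ip : String), Dom_split_ip ip → Pre_split_ip ip → Spec_split_ip ip (split_ip ip)

-- ===== LEMMAS AND PROOFS =====

def NoBr (s : List Char) : Prop := ∀ c ∈ s, c ≠ '[' ∧ c ≠ ']'

-- well-formed strings: bracket-free, or s '[' h ']' rest with s, h bracket-free
inductive WFip : List Char → Prop
  | nil (s : List Char) (hs : NoBr s) : WFip s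
  | cons (s h rest : List Char) (hs : NoBr s) (hh : NoBr h) (hr : WFip rest) :
      WFip (s ++ ('[' :: (h ++ (']' :: rest))))

theorem findIdx?_first (p : Char → Bool) (s t : List Char) (a : Char)
    (hs : ∀ c ∈ s, p c = false) (ha : p a = true) :
    (s ++ (a :: t)).findIdx? p = some s.length := by
  induction s with
  | nil => simp [List.findIdx?_cons, ha]
  | cons c s ih =>
      have hc : p c = false := hs c (by simp)
      have := ih (fun c hc => hs c (by simp [hc]))
      simp [List.findIdx?_cons, hc, this]

theorem splitA_step (s h rest : List Char) (sup hyp : List String)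
    (hs : NoBr s) (hh : NoBr h) :
    split_ip_go (s ++ ('[' :: (h ++ (']' :: rest)))) sup hyp
      = split_ip_go rest (sup ++ [String.ofList s]) (hyp ++ [String.ofList h]) := by
  have hfo : (s ++ ('[' :: (h ++ (']' :: rest)))).findIdx? (fun c => decide (c = '[')) = some s.length :=
    findIdx?_first _ s _ '[' (fun c hc => decide_eq_false (hs c hc).1) (by decide)
  have hfc : (s ++ ('[' :: (h ++ (']' :: rest)))).findIdx? (fun c => decide (c = ']'))
      = some (s.length + 1 + h.length) := by
    have key : ((s ++ ('[' :: h)) ++ (']' :: rest)).findIdx? (fun c => decide (c = ']'))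
        = some (s ++ ('[' :: h)).length := by
      refine findIdx?_first _ _ _ ']' ?_ (by decide)
      intro c hc
      rcases List.mem_append.mp hc with hc | hc
      · exact decide_eq_false (hs c hc).2
      · rcases List.mem_cons.mp hc with rfl | hc
        · decide
        · exact decide_eq_false (hh c hc).2
    rw [List.append_assoc, List.cons_append] at key
    rw [key]
    simp only [Option.some.injEq, List.length_append, List.length_cons]
    omega
  rw [split_ip_go]
  split
  next heq => rw [hfo] at heq; cases heq
  next idx heq =>
    rw [hfo] at heq
    obtain rfl : idx = s.length := (Option.some.inj heq).symm
    split
    next heq2 => rw [hfc] at heq2; cases heq2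
    next e heq2 =>
      rw [hfc] at heq2
      obtain rfl : e = s.length + 1 + h.length := (Option.some.inj heq2).symm
      rw [if_pos (by omega)]
      have htake : (s ++ ('[' :: (h ++ (']' :: rest)))).take s.length = s := by
        simpa using List.take_left s ('[' :: (h ++ (']' :: rest)))
      have hdrop1 : (s ++ ('[' :: (h ++ (']' :: rest)))).drop (s.length + 1)
          = h ++ (']' :: rest) := by
        have : ((s ++ ['[']) ++ (h ++ (']' :: rest))).drop (s ++ ['[']).length
            = h ++ (']' :: rest) := List.drop_left
        simpa [List.append_assoc, Nat.add_comm] using this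
      have htake2 : (h ++ (']' :: rest)).take (s.length + 1 + h.length - s.length - 1) = h := by
        have he : s.length + 1 + h.length - s.length - 1 = h.length := by omega
        rw [he]; simpa using List.take_left h (']' :: rest)
      have hdrop2 : (s ++ ('[' :: (h ++ (']' :: rest)))).drop (s.length + 1 + h.length + 1)
          = rest := by
        have hd : ((s ++ ('[' :: (h ++ [']']))) ++ rest).drop (s ++ ('[' :: (h ++ [']']))).length
            = rest := List.drop_left
        have hlen : (s ++ ('[' :: (h ++ [']']))).length = s.length + 1 + h.length + 1 := by
          simp; omega
        simpa [hlen, List.append_assoc] using hd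
      rw [htake, hdrop1, htake2, hdrop2]

theorem splitA_nobr (s : List Char) (sup hyp : List String) (hs : NoBr s) :
    split_ip_go s sup hyp = (sup ++ [String.ofList s], hyp) := by
  have hfo : s.findIdx? (fun c => decide (c = '[')) = none := by
    rw [List.findIdx?_eq_none_iff]
    intro c hc; exact decide_eq_false (hs c hc).1
  rw [split_ip_go]
  split
  next heq => rfl
  next idx heq => rw [hfo] at heq; cases heq

theorem foldB_nobr (s : List Char) (sup hyp : List String) (cur : List Char) (b : Bool)
    (hs : NoBr s) :
    s.foldl stepB (sup, hyp, cur, b) = (sup, hyp, cur ++ s, b) := by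
  induction s generalizing cur with
  | nil => simp
  | cons c s ih =>
      have hc := hs c (by simp)
      have ih' := ih (cur ++ [c]) (fun c hc => hs c (by simp [hc]))
      simp only [List.foldl_cons, stepB, hc.1, hc.2, ite_false]
      simpa using ih'

theorem main_equiv (cs : List Char) (hwf : WFip cs) :
    ∀ (sup hyp : List String) (cur : List Char), NoBr cur →
      split_ip_go (cur ++ cs) sup hyp
        = (let st := cs.foldl stepB (sup, hyp, cur, false)
           (st.1 ++ [String.ofList st.2.2.1], st.2.1)) := by
  induction hwf with
  | nil s hs =>
      intro sup hyp cur hcur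
      have hns : NoBr (cur ++ s) := by
        intro c hc; rcases List.mem_append.mp hc with h | h
        · exact hcur c h
        · exact hs c h
      rw [splitA_nobr _ _ _ hns, foldB_nobr _ _ _ _ _ hs]
  | cons s h rest hs hh _ ih =>
      intro sup hyp cur hcur
      have hns : NoBr (cur ++ s) := by
        intro c hc; rcases List.mem_append.mp hc with hx | hx
        · exact hcur c hx
        · exact hs c hx
      -- A side
      have hA : split_ip_go (cur ++ (s ++ ('[' :: (h ++ (']' :: rest))))) sup hyp
          = split_ip_go rest (sup ++ [String.ofList (cur ++ s)]) (hyp ++ [String.ofList h]) := by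
        have := splitA_step (cur ++ s) h rest sup hyp hns hh
        simpa [List.append_assoc] using this
      -- B side
      have hB : (s ++ ('[' :: (h ++ (']' :: rest)))).foldl stepB (sup, hyp, cur, false)
          = rest.foldl stepB
              (sup ++ [String.ofList (cur ++ s)], hyp ++ [String.ofList h], [], false) := by
        rw [List.foldl_append, foldB_nobr s sup hyp cur false hs, List.foldl_cons]
        have e1 : stepB (sup, hyp, cur ++ s, false) '['
            = (sup ++ [String.ofList (cur ++ s)], hyp, [], true) := by
          simp [stepB]
        rw [e1, List.foldl_append, foldB_nobr h _ _ _ _ hh, List.foldl_cons]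
        have e2 : stepB (sup ++ [String.ofList (cur ++ s)], hyp,
            ([] : List Char) ++ h, true) ']'
            = (sup ++ [String.ofList (cur ++ s)], hyp ++ [String.ofList h], [], false) := by
          simp [stepB]
        rw [e2]
      have hih := ih (sup ++ [String.ofList (cur ++ s)]) (hyp ++ [String.ofList h]) []
        (by intro c hc; simp at hc)
      simp only [List.nil_append] at hih
      rw [hA, hih, hB]

theorem filter_cons_decomp (cs : List Char) (b : Char) (bs : List Char)
    (h : cs.filter isBr = b :: bs) :
    ∃ s t, cs = s ++ (b :: t) ∧ NoBr s ∧ t.filter isBr = bs := by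
  induction cs with
  | nil => simp at h
  | cons c cs ih =>
      by_cases hc : isBr c = true
      · rw [List.filter_cons_of_pos hc] at h
        obtain ⟨rfl, rfl⟩ : c = b ∧ cs.filter isBr = bs := by
          constructor <;> [exact (List.cons.injEq _ _ _ _ ▸ h).1; exact (List.cons.injEq _ _ _ _ ▸ h).2]
        exact ⟨[], cs, by simp, by intro x hx; simp at hx, rfl⟩
      · rw [List.filter_cons_of_neg hc] at h
        obtain ⟨s, t, rfl, hns, hft⟩ := ih h
        refine ⟨c :: s, t, by simp, ?_, hft⟩
        intro x hx
        rcases List.mem_cons.mp hx with rfl | hx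
        · constructor <;> (intro he; subst he; simp [isBr] at hc)
        · exact hns x hx

theorem nobr_of_filter_nil (cs : List Char) (h : cs.filter isBr = []) : NoBr cs := by
  intro c hc
  have := List.filter_eq_nil_iff.mp h c hc
  constructor <;> (intro he; subst he; simp [isBr] at this)

theorem altBr_cons (b : Char) (bs : List Char) (h : altBr (b :: bs) = true) :
    b = '[' ∧ ∃ r, bs = ']' :: r ∧ altBr r = true := by
  cases bs with
  | nil => simp [altBr] at h
  | cons c r =>
      have h' := h
      simp only [altBr, Bool.and_eq_true, decide_eq_true_eq] at h'
      exact ⟨h'.1.1, r, by rw [h'.1.2], h'.2⟩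

theorem pre_wf (cs : List Char) (hpre : altBr (cs.filter isBr) = true) : WFip cs := by
  induction hn : cs.length using Nat.strong_induction_on generalizing cs with
  | _ n ih =>
  match hf : cs.filter isBr with
  | [] => exact WFip.nil cs (nobr_of_filter_nil cs hf)
  | b :: bs =>
      rw [hf] at hpre
      obtain ⟨rfl, r, rfl, hr⟩ := altBr_cons b bs hpre
      obtain ⟨s, t, rfl, hns, hft⟩ := filter_cons_decomp cs '[' (']' :: r) hf
      obtain ⟨h2, t2, rfl, hnh, hft2⟩ := filter_cons_decomp t ']' r hft
      have hlt : t2.length < n := by simp at hn; omega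
      have hwf : WFip t2 := ih t2.length hlt t2 (by rw [hft2]; exact hr) rfl
      exact WFip.cons s h2 t2 hns hnh hwf

-- ===== VERDICT (by name: the statement is the Claim_ definition above) =====
theorem split_ip_spec : Claim_equal_split_ip := by
  intro ip _ hpre
  unfold Spec_split_ip split_ip split_ip_alt
  have hwf := pre_wf ip.toList hpre
  have := main_equiv ip.toList hwf [] [] [] (by intro c hc; simp at hc)
  simpa using this
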